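-- pv_equiv track=rewrite | github.com/NotSaminnn/Data-Structure-Codes | graph_problems.py | wantToReturnStart
-- ===== SOURCE A (Python) =====
-- def wantToReturnStart(graph):
--     n = len(graph)
--
--     # We'll track if we can reach node 0 from each node
--     # Start by checking which nodes can directly reach node 0
--     can_reach_zero = [False] * n
--
--     # Nodes that have a direct edge to node 0
--     for i in range(n):
--         if graph[i][0] == 1:
--             can_reach_zero[i] = True
--
--     # Keep propagating the "can reach zero" information
--     # until no more changes occur (similar to a simple BFS)
--     changed = True
--     while changed:
--         changed = False
--         for i in range(n):
--             if not can_reach_zero[i]: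
--                 # Check if node i can reach any node that can reach zero
--                 for j in range(n):
--                     if graph[i][j] == 1 and can_reach_zero[j]:
--                         can_reach_zero[i] = True
--                         changed = True
--                         break
--
--     # Finally, check if node 0 can reach any node that can reach node 0
--     for j in range(n):
--         if graph[0][j] == 1 and can_reach_zero[j]:
--             return True
--
--     return False
-- ===== SOURCE B (Python) =====
-- def wantToReturnStart(graph):
--     n = len(graph)
--     # reverse-graph BFS by levels: collect every node that can reach node 0
--     can = {i for i in range(n) if graph[i][0] == 1}
--     frontier = can
--     while frontier:
--         frontier = {i for i in range(n)
--                     if i not in can and any(graph[i][j] == 1 for j in frontier)}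
--         can |= frontier
--     # node 0 lies on a cycle iff it has an edge into a node that reaches 0
--     return any(graph[0][j] == 1 and j in can for j in range(n))
-- ===== Notes on version B (the rewrite author's own statement) =====
-- stated objective: faster
-- what changed: Replaced A's repeated full O(n^2) relaxation sweeps (iterated until no change, O(n^3) worst case) by a level-by-level reverse-graph BFS in which each node enters the frontier at most once, then the same final check on node 0's out-edges.
-- outside the precondition, e.g. on wantToReturnStart([[1], [1, 1]]): A returns True, B returns True
import Mathlib
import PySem

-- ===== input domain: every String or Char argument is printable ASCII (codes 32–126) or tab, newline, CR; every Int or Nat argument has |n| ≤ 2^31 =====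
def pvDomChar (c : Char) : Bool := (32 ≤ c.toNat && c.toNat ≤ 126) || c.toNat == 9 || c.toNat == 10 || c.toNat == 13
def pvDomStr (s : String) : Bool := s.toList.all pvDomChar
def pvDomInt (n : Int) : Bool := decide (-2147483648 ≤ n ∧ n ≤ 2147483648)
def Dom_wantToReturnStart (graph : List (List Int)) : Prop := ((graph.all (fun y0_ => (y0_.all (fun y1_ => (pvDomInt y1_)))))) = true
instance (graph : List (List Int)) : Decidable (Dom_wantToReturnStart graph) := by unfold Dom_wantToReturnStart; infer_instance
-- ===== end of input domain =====

-- B replaces A's repeatedly restarted O(n^2) relaxation sweeps (O(n^3) worst case) by a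
-- level-by-level reverse-graph BFS (each node enters the frontier at most once, O(n^2)).

-- ===== PORT A =====
-- graph[i][j] == 1  (indices are the nonnegative ints produced by range(n); in range under Pre_)
def pvEdge (g : List (List Int)) (i j : Nat) : Bool :=
  (PySem.List.pyGetD (PySem.List.pyGetD g (i : Int) []) (j : Int) 0) == 1

-- body of "for i in range(n)" inside the while-loop; state = (can_reach_zero, changed);
-- the inner "for j … break" only decides existence, kept as the short-circuiting any
def pvStepA (g : List (List Int)) (st : List Bool × Bool) (i : Nat) : List Bool × Bool :=
  if st.1.getD i false then st
  else if (List.range g.length).any (fun j => pvEdge g i j && st.1.getD j false) then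
    (st.1.set i true, true)
  else st

-- one full pass of the while-loop body (changed := False, then the for-loop)
def pvSweepA (g : List (List Int)) (c : List Bool) : List Bool × Bool :=
  (List.range g.length).foldl (pvStepA g) (c, false)

-- "while changed:" — fuel n+1 only makes the loop total: each changing sweep adds a True,
-- so at most n changing sweeps happen before the final unchanged one (proved below)
def pvLoopA (g : List (List Int)) : Nat → List Bool → List Bool
  | 0, c => c
  | fuel + 1, c =>
    let p := pvSweepA g c
    if p.2 then pvLoopA g fuel p.1 else p.1

def wantToReturnStart (graph : List (List Int)) : Bool :=
  let n := graph.length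
  let c0 := (List.range n).foldl
    (fun c i => if pvEdge graph i 0 then c.set i true else c) (List.replicate n false)
  let c := pvLoopA graph (n + 1) c0
  (List.range n).any (fun j => pvEdge graph 0 j && c.getD j false)

-- ===== PORT B =====
-- "while frontier:" — fuel n+1 only makes the loop total: each round with a nonempty new
-- frontier strictly grows can (proved below)
def pvLoopB (g : List (List Int)) : Nat → PySem.Set Nat → PySem.Set Nat → PySem.Set Nat
  | 0, can, _ => can
  | fuel + 1, can, frontier =>
    if frontier.isEmpty then can
    else
      let newF : PySem.Set Nat := PySem.Set.ofList ((List.range g.length).filter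
        (fun i => !(PySem.Set.contains can i) && frontier.any (fun j => pvEdge g i j)))
      pvLoopB g fuel (PySem.Set.union can newF) newF

def wantToReturnStart_alt (graph : List (List Int)) : Bool :=
  let n := graph.length
  let can0 : PySem.Set Nat := PySem.Set.ofList ((List.range n).filter (fun i => pvEdge graph i 0))
  let can := pvLoopB graph (n + 1) can0 can0
  (List.range n).any (fun j => pvEdge graph 0 j && PySem.Set.contains can j)

-- ===== PRECONDITION & SPEC =====
-- Pre_ excludes graphs having a row shorter than len(graph): there A indexes past a row's
-- end and may raise IndexError (on some such graphs A still returns, when edge values make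
-- every short access short-circuit away; those are excluded with this shape bound too).
def Pre_wantToReturnStart (graph : List (List Int)) : Prop :=
  ∀ row ∈ graph, graph.length ≤ row.length
instance (graph : List (List Int)) : Decidable (Pre_wantToReturnStart graph) := by
  unfold Pre_wantToReturnStart; infer_instance

def pvWitness_wantToReturnStart : List (List Int) := [[0, 1], [1, 0]]

def Spec_wantToReturnStart (graph : List (List Int)) (out : Bool) : Prop := out = wantToReturnStart_alt graph
instance (graph : List (List Int)) (out : Bool) : Decidable (Spec_wantToReturnStart graph out) := by unfold Spec_wantToReturnStart; infer_instance

-- ===== CLAIM (what is proved, stated in full; the proofs are below) =====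
def Claim_equal_wantToReturnStart : Prop := ∀ (graph : List (List Int)), Dom_wantToReturnStart graph → Pre_wantToReturnStart graph → Spec_wantToReturnStart graph (wantToReturnStart graph)

-- ===== LEMMAS AND PROOFS =====

-- "node i has a path of length ≥ 1 to node 0" (intermediate nodes below n, as both programs use)
inductive pvReach (g : List (List Int)) : Nat → Prop
  | base (i : Nat) : pvEdge g i 0 = true → pvReach g i
  | step (i j : Nat) : j < g.length → pvEdge g i j = true → pvReach g j → pvReach g i

theorem pvGetD_set_true {c : List Bool} {i k : Nat} (h : i < c.length) :
    (c.set i true).getD k false = if k = i then true else c.getD k false := by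
  simp only [List.getD_eq_getElem?_getD, List.getElem?_set]
  split <;> rename_i hk
  · subst hk; simp
  · rw [if_neg (Ne.symm hk)]
theorem pvInitA_go (g : List (List Int)) (l : List Nat) : ∀ (c : List Bool),
    (∀ i ∈ l, i < c.length) →
    (l.foldl (fun c i => if pvEdge g i 0 then c.set i true else c) c).length = c.length ∧
    ∀ k, (l.foldl (fun c i => if pvEdge g i 0 then c.set i true else c) c).getD k false
          = (c.getD k false || (decide (k ∈ l) && pvEdge g k 0)) := by
  induction l with
  | nil => intro c _; simp
  | cons i l ih =>
    intro c hl
    have hi : i < c.length := hl i (by simp)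
    by_cases he : pvEdge g i 0 = true
    · have hlen : (c.set i true).length = c.length := by simp
      obtain ⟨ih1, ih2⟩ := ih (c.set i true)
        (fun x hx => by rw [hlen]; exact hl x (List.mem_cons_of_mem _ hx))
      refine ⟨by simp only [List.foldl_cons, he, if_pos]; rw [ih1, hlen], ?_⟩
      intro k
      simp only [List.foldl_cons, he, if_pos] at ih2 ⊢
      rw [ih2 k, pvGetD_set_true hi]
      by_cases hk : k = i
      · subst hk; simp [he]
      · simp [hk]
    · obtain ⟨ih1, ih2⟩ := ih c (fun x hx => hl x (List.mem_cons_of_mem _ hx))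
      refine ⟨by simp only [List.foldl_cons, he, if_neg, Bool.false_eq_true, not_false_iff]; exact ih1, ?_⟩
      intro k
      simp only [List.foldl_cons, if_neg he]
      rw [ih2 k]
      by_cases hk : k = i
      · subst hk; simp [he]
      · simp [hk]

theorem pvCountTrue_le (c : List Bool) : ∀ (r : List Bool), r.length = c.length →
    (∀ k, c.getD k false = true → r.getD k false = true) →
    c.count true ≤ r.count true := by
  induction c with
  | nil => simp
  | cons a c ih =>
    intro r hlen hmono
    cases r with
    | nil => simp at hlen
    | cons b r =>
      simp only [List.length_cons] at hlen
      have := ih r (by omega) (fun k hk => hmono (k+1) hk)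
      have hhead := hmono 0
      simp only [List.getD_cons_zero] at hhead
      simp only [List.count_cons]
      cases a <;> cases b <;> simp_all <;> omega
theorem pvCountTrue_lt (c : List Bool) : ∀ (r : List Bool) (k : Nat), r.length = c.length →
    (∀ k, c.getD k false = true → r.getD k false = true) →
    c.getD k false = false → r.getD k false = true →
    c.count true < r.count true := by
  induction c with
  | nil =>
    intro r k hlen _ _ hkr
    have : r = [] := List.eq_nil_of_length_eq_zero (by simpa using hlen)
    subst this; rw [List.getD_nil] at hkr; exact absurd hkr (by simp)
  | cons a c ih =>
    intro r k hlen hmono hkc hkr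
    cases r with
    | nil => simp at hlen
    | cons b r =>
      simp only [List.length_cons] at hlen
      have htail : ∀ k, c.getD k false = true → r.getD k false = true :=
        fun k hk => hmono (k+1) hk
      have hhead := hmono 0
      simp only [List.getD_cons_zero] at hhead
      simp only [List.count_cons]
      cases k with
      | zero =>
        simp only [List.getD_cons_zero] at hkc hkr
        have hc := pvCountTrue_le c r (by omega) htail
        simp [hkc, hkr]; omega
      | succ k =>
        simp only [List.getD_cons_succ] at hkc hkr
        have := ih r k (by omega) htail hkc hkr
        cases a <;> cases b <;> simp_all <;> omega
theorem pvSweepA_go (g : List (List Int)) (l : List Nat) : ∀ (c : List Bool) (ch : Bool),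
    (∀ i ∈ l, i < c.length) →
    (l.foldl (pvStepA g) (c, ch)).1.length = c.length ∧
    (∀ k, c.getD k false = true → (l.foldl (pvStepA g) (c, ch)).1.getD k false = true) ∧
    (ch = true → (l.foldl (pvStepA g) (c, ch)).2 = true) ∧
    ((∀ j, c.getD j false = true → pvReach g j) →
      ∀ j, (l.foldl (pvStepA g) (c, ch)).1.getD j false = true → pvReach g j) ∧
    ((l.foldl (pvStepA g) (c, ch)).2 = false →
      (l.foldl (pvStepA g) (c, ch)).1 = c ∧
      ∀ i ∈ l, c.getD i false = false →
        (List.range g.length).any (fun j => pvEdge g i j && c.getD j false) = false) ∧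
    ((l.foldl (pvStepA g) (c, ch)).2 = true → ch = true ∨
      ∃ k, c.getD k false = false ∧ (l.foldl (pvStepA g) (c, ch)).1.getD k false = true) := by
  induction l with
  | nil =>
    intro c ch _
    refine ⟨rfl, fun k hk => hk, fun h => h, fun hs j hj => hs j hj, fun _ => ⟨rfl, by simp⟩,
      fun h2 => Or.inl ?_⟩
    simpa using h2
  | cons i l ih =>
    intro c ch hl
    have hi : i < c.length := hl i (by simp)
    have hltail : ∀ x ∈ l, x < c.length := fun x hx => hl x (List.mem_cons_of_mem _ hx)
    by_cases h1 : c.getD i false = true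
    · have hstep : pvStepA g (c, ch) i = (c, ch) := by
        simp only [pvStepA]
        rw [if_pos (by simpa using h1)]
      simp only [List.foldl_cons, hstep]
      obtain ⟨ih1, ih2, ih3, ih4, ih5, ih6⟩ := ih c ch hltail
      refine ⟨ih1, ih2, ih3, ih4, ?_, ih6⟩
      intro hf
      obtain ⟨he, hcl⟩ := ih5 hf
      refine ⟨he, ?_⟩
      intro x hx hxf
      rcases List.mem_cons.mp hx with h | h
      · subst h; rw [h1] at hxf; exact absurd hxf (by simp)
      · exact hcl x h hxf
    · replace h1 : c.getD i false = false := by simpa using h1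
      by_cases h2 : (List.range g.length).any (fun j => pvEdge g i j && c.getD j false) = true
      · have hstep : pvStepA g (c, ch) i = (c.set i true, true) := by
          simp only [pvStepA]
          rw [if_neg (by simpa using h1), if_pos (by simpa using h2)]
        simp only [List.foldl_cons, hstep]
        have hlen : (c.set i true).length = c.length := by simp
        obtain ⟨ih1, ih2, ih3, ih4, ih5, ih6⟩ :=
          ih (c.set i true) true (fun x hx => by rw [hlen]; exact hltail x hx)
        have hmono : ∀ k, c.getD k false = true → (c.set i true).getD k false = true := by
          intro k hk
          rw [pvGetD_set_true hi]
          split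
          · rfl
          · exact hk
        have hflag := ih3 rfl
        refine ⟨ih1.trans hlen, fun k hk => ih2 k (hmono k hk), fun _ => hflag, ?_, ?_, ?_⟩
        · intro hs j hj
          refine ih4 ?_ j hj
          intro j' hj'
          rw [pvGetD_set_true hi] at hj'
          by_cases hji : j' = i
          · subst hji
            obtain ⟨j2, hj2r, hj2⟩ := List.any_eq_true.mp h2
            have hj2n : j2 < g.length := List.mem_range.mp hj2r
            obtain ⟨he, hc⟩ := Bool.and_eq_true_iff.mp hj2
            exact pvReach.step j' j2 hj2n he (hs j2 hc)
          · rw [if_neg hji] at hj'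
            exact hs j' hj'
        · intro hf; rw [hflag] at hf; exact absurd hf (by simp)
        · intro _
          refine Or.inr ⟨i, h1, ?_⟩
          refine ih2 i ?_
          rw [pvGetD_set_true hi]; simp
      · replace h2 : (List.range g.length).any (fun j => pvEdge g i j && c.getD j false) = false := by
          simpa using h2
        have hstep : pvStepA g (c, ch) i = (c, ch) := by
          simp only [pvStepA]
          rw [if_neg (by simpa using h1), if_neg (by simpa using h2)]
        simp only [List.foldl_cons, hstep]
        obtain ⟨ih1, ih2, ih3, ih4, ih5, ih6⟩ := ih c ch hltail
        refine ⟨ih1, ih2, ih3, ih4, ?_, ih6⟩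
        intro hf
        obtain ⟨he, hcl⟩ := ih5 hf
        refine ⟨he, ?_⟩
        intro x hx hxf
        rcases List.mem_cons.mp hx with h | h
        · subst h; exact h2
        · exact hcl x h hxf
theorem pvLoopA_spec (g : List (List Int)) : ∀ (fuel : Nat) (c : List Bool),
    c.length = g.length →
    (∀ j, c.getD j false = true → pvReach g j) →
    g.length - c.count true < fuel →
    (∀ k, c.getD k false = true → (pvLoopA g fuel c).getD k false = true) ∧
    (∀ j, (pvLoopA g fuel c).getD j false = true → pvReach g j) ∧
    (∀ i, i < g.length → (pvLoopA g fuel c).getD i false = false →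
      (List.range g.length).any (fun j => pvEdge g i j && (pvLoopA g fuel c).getD j false) = false) := by
  intro fuel
  induction fuel with
  | zero => intro c _ _ hf; omega
  | succ fuel ih =>
    intro c hlen hsound hf
    obtain ⟨g1, g2, g3, g4, g5, g6⟩ := pvSweepA_go g (List.range g.length) c false
      (fun x hx => by rw [hlen]; exact List.mem_range.mp hx)
    have hsw : pvSweepA g c = (List.range g.length).foldl (pvStepA g) (c, false) := rfl
    by_cases hch : (pvSweepA g c).2 = true
    · have hstep : pvLoopA g (fuel + 1) c = pvLoopA g fuel (pvSweepA g c).1 := by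
        simp only [pvLoopA]
        rw [if_pos hch]
      rw [hsw] at hch
      obtain ⟨k, hk1, hk2⟩ := (g6 hch).resolve_left (by simp)
      have hcount : c.count true < ((List.range g.length).foldl (pvStepA g) (c, false)).1.count true :=
        pvCountTrue_lt c _ k g1 g2 hk1 hk2
      have hcle : ((List.range g.length).foldl (pvStepA g) (c, false)).1.count true ≤ g.length := by
        have := List.count_le_length (l := ((List.range g.length).foldl (pvStepA g) (c, false)).1) (a := true)
        omega
      obtain ⟨i1, i2, i3⟩ := ih (pvSweepA g c).1
        (by rw [hsw]; rw [g1, hlen]) (by rw [hsw]; exact g4 hsound) (by rw [hsw]; omega)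
      rw [hstep]
      exact ⟨fun k hk => i1 k (by rw [hsw]; exact g2 k hk), i2, i3⟩
    · replace hch : (pvSweepA g c).2 = false := by simpa using hch
      have hstep : pvLoopA g (fuel + 1) c = (pvSweepA g c).1 := by
        simp only [pvLoopA]
        rw [if_neg (by simp [hch])]
      rw [hsw] at hch
      obtain ⟨heq, hclosed⟩ := g5 hch
      rw [hstep, hsw, heq]
      refine ⟨fun k hk => hk, hsound, ?_⟩
      intro i hi hif
      exact hclosed i (List.mem_range.mpr hi) hif
theorem pvNodupLtLength {s t : List Nat} (hs : s.Nodup) (hsub : ∀ y ∈ s, y ∈ t)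
    (x : Nat) (hx : x ∈ t) (hxs : x ∉ s) : s.length < t.length := by
  have h1 : (x :: s).Subperm t := by
    apply List.subperm_of_subset
    · simp [hs, hxs]
    · intro y hy
      rcases List.mem_cons.mp hy with h | h
      · subst h; exact hx
      · exact hsub y h
  simpa using h1.length_le
theorem pvLoopB_spec (g : List (List Int)) : ∀ (fuel : Nat) (can frontier : PySem.Set Nat),
    (∀ j ∈ can, j < g.length ∧ pvReach g j) →
    can.Nodup →
    (∀ j ∈ frontier, j ∈ can) →
    (∀ i, i < g.length → i ∉ can → ∀ j ∈ can, j ∉ frontier → pvEdge g i j = false) →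
    (frontier = [] ∨ g.length - can.length < fuel) →
    (∀ j ∈ pvLoopB g fuel can frontier, j < g.length ∧ pvReach g j) ∧
    (∀ j ∈ can, j ∈ pvLoopB g fuel can frontier) ∧
    (∀ i, i < g.length → i ∉ pvLoopB g fuel can frontier →
      ∀ j ∈ pvLoopB g fuel can frontier, pvEdge g i j = false) := by
  intro fuel
  induction fuel with
  | zero =>
    intro can frontier hsound hnd hsub hcl hdis
    have hfe : frontier = [] := by
      rcases hdis with h | h
      · exact h
      · omega
    subst hfe
    refine ⟨hsound, fun j hj => hj, ?_⟩
    intro i hi hir j hjr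
    exact hcl i hi hir j hjr (List.not_mem_nil)
  | succ fuel ih =>
    intro can frontier hsound hnd hsub hcl hdis
    by_cases hfe : frontier.isEmpty = true
    · have hstep : pvLoopB g (fuel + 1) can frontier = can := by
        simp only [pvLoopB]
        rw [if_pos hfe]
      rw [hstep]
      have hfnil : frontier = [] := List.isEmpty_iff.mp hfe
      subst hfnil
      refine ⟨hsound, fun j hj => hj, ?_⟩
      intro i hi hir j hjr
      exact hcl i hi hir j hjr (List.not_mem_nil)
    · have hflist : ((List.range g.length).filter
          (fun i => !(PySem.Set.contains can i) && frontier.any (fun j => pvEdge g i j))).Nodup :=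
        List.Nodup.filter _ List.nodup_range
      have hNF : PySem.Set.ofList ((List.range g.length).filter
            (fun i => !(PySem.Set.contains can i) && frontier.any (fun j => pvEdge g i j)))
          = (List.range g.length).filter
            (fun i => !(PySem.Set.contains can i) && frontier.any (fun j => pvEdge g i j)) :=
        PySem.Set.ofList_eq_self_of_nodup _ hflist
      have hstep : pvLoopB g (fuel + 1) can frontier
          = pvLoopB g fuel
              (PySem.Set.union can ((List.range g.length).filter
                (fun i => !(PySem.Set.contains can i) && frontier.any (fun j => pvEdge g i j))))
              ((List.range g.length).filter
                (fun i => !(PySem.Set.contains can i) && frontier.any (fun j => pvEdge g i j))) := by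
        simp only [pvLoopB]
        rw [if_neg (by simp [hfe]), hNF]
      have hfr : frontier ≠ [] := by
        intro h; subst h; simp at hfe
      have hmemF : ∀ x, x ∈ (List.range g.length).filter
          (fun i => !(PySem.Set.contains can i) && frontier.any (fun j => pvEdge g i j)) ↔
          x < g.length ∧ x ∉ can ∧ ∃ j ∈ frontier, pvEdge g x j = true := by
        intro x
        rw [List.mem_filter, List.mem_range]
        constructor
        · rintro ⟨hx, hp⟩
          obtain ⟨hc, ha⟩ := Bool.and_eq_true_iff.mp hp
          refine ⟨hx, ?_, ?_⟩
          · intro hmem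
            rw [Bool.not_eq_true', ← Bool.not_eq_true] at hc
            exact hc ((PySem.Set.contains_iff _ _).mpr hmem)
          · simpa using List.any_eq_true.mp ha
        · rintro ⟨hx, hc, j, hjf, hej⟩
          refine ⟨hx, ?_⟩
          rw [Bool.and_eq_true_iff]
          constructor
          · rw [Bool.not_eq_true']
            rw [← Bool.not_eq_true] at *
            intro hcc
            exact hc ((PySem.Set.contains_iff _ _).mp hcc)
          · exact List.any_eq_true.mpr ⟨j, hjf, hej⟩
      have hmemU : ∀ x, x ∈ PySem.Set.union can ((List.range g.length).filter
          (fun i => !(PySem.Set.contains can i) && frontier.any (fun j => pvEdge g i j))) ↔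
          x ∈ can ∨ x ∈ (List.range g.length).filter
          (fun i => !(PySem.Set.contains can i) && frontier.any (fun j => pvEdge g i j)) := by
        intro x; exact PySem.Set.mem_union _ _ _
      have hndU : (PySem.Set.union can ((List.range g.length).filter
          (fun i => !(PySem.Set.contains can i) && frontier.any (fun j => pvEdge g i j)))).Nodup :=
        PySem.Set.nodup_union _ _ hnd
      have hsound' : ∀ j ∈ PySem.Set.union can ((List.range g.length).filter
          (fun i => !(PySem.Set.contains can i) && frontier.any (fun j => pvEdge g i j))),
          j < g.length ∧ pvReach g j := by
        intro j hj
        rcases (hmemU j).mp hj with h | h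
        · exact hsound j h
        · obtain ⟨hlt, _, j', hj'f, he⟩ := (hmemF j).mp h
          obtain ⟨hj'lt, hj'r⟩ := hsound j' (hsub j' hj'f)
          exact ⟨hlt, pvReach.step j j' hj'lt he hj'r⟩
      have hsub' : ∀ j ∈ (List.range g.length).filter
          (fun i => !(PySem.Set.contains can i) && frontier.any (fun j => pvEdge g i j)),
          j ∈ PySem.Set.union can ((List.range g.length).filter
          (fun i => !(PySem.Set.contains can i) && frontier.any (fun j => pvEdge g i j))) := by
        intro j hj; exact (hmemU j).mpr (Or.inr hj)
      have hcl' : ∀ i, i < g.length → i ∉ PySem.Set.union can ((List.range g.length).filter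
          (fun i => !(PySem.Set.contains can i) && frontier.any (fun j => pvEdge g i j))) →
          ∀ j ∈ PySem.Set.union can ((List.range g.length).filter
          (fun i => !(PySem.Set.contains can i) && frontier.any (fun j => pvEdge g i j))),
          j ∉ (List.range g.length).filter
          (fun i => !(PySem.Set.contains can i) && frontier.any (fun j => pvEdge g i j)) →
          pvEdge g i j = false := by
        intro i hi hiu j hju hjF
        have hican : i ∉ can := fun h => hiu ((hmemU i).mpr (Or.inl h))
        have hiF : i ∉ (List.range g.length).filter
            (fun i => !(PySem.Set.contains can i) && frontier.any (fun j => pvEdge g i j)) :=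
          fun h => hiu ((hmemU i).mpr (Or.inr h))
        have hjcan : j ∈ can := by
          rcases (hmemU j).mp hju with h | h
          · exact h
          · exact absurd h hjF
        by_cases hjf : j ∈ frontier
        · by_contra hne
          replace hne : pvEdge g i j = true := by simpa using hne
          exact hiF ((hmemF i).mpr ⟨hi, hican, j, hjf, hne⟩)
        · exact hcl i hi hican j hjcan hjf
      have hmeas : ((List.range g.length).filter
            (fun i => !(PySem.Set.contains can i) && frontier.any (fun j => pvEdge g i j))) = [] ∨
          g.length - (PySem.Set.union can ((List.range g.length).filter
            (fun i => !(PySem.Set.contains can i) && frontier.any (fun j => pvEdge g i j)))).length < fuel := by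
        rcases List.eq_nil_or_concat' ((List.range g.length).filter
            (fun i => !(PySem.Set.contains can i) && frontier.any (fun j => pvEdge g i j))) with h | ⟨l, x, h⟩
        · exact Or.inl h
        · refine Or.inr ?_
          have hxF : x ∈ (List.range g.length).filter
              (fun i => !(PySem.Set.contains can i) && frontier.any (fun j => pvEdge g i j)) := by
            rw [h]; simp
          obtain ⟨hxlt, hxcan, _⟩ := (hmemF x).mp hxF
          have h1 : can.length < g.length := by
            have := pvNodupLtLength hnd (fun y hy => List.mem_range.mpr (hsound y hy).1)
              x (List.mem_range.mpr hxlt) hxcan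
            simpa using this
          have h2 : can.length < (PySem.Set.union can ((List.range g.length).filter
              (fun i => !(PySem.Set.contains can i) && frontier.any (fun j => pvEdge g i j)))).length :=
            pvNodupLtLength hnd (fun y hy => (hmemU y).mpr (Or.inl hy)) x
              ((hmemU x).mpr (Or.inr hxF)) hxcan
          have h3 := hdis.resolve_left hfr
          omega
      obtain ⟨s, sub, cl⟩ := ih _ _ hsound' hndU hsub' hcl' hmeas
      rw [hstep]
      exact ⟨s, fun j hj => sub j ((hmemU j).mpr (Or.inl hj)), cl⟩
theorem pvReach_marked (g : List (List Int)) (mark : Nat → Bool)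
    (hbase : ∀ i, i < g.length → pvEdge g i 0 = true → mark i = true)
    (hclosed : ∀ i, i < g.length → mark i = false →
      (List.range g.length).any (fun j => pvEdge g i j && mark j) = false) :
    ∀ j, pvReach g j → j < g.length → mark j = true := by
  intro j hr
  induction hr with
  | base i he => intro hi; exact hbase i hi he
  | step i j hj he hr ih =>
    intro hi
    by_contra hmi
    replace hmi : mark i = false := by simpa using hmi
    have hcl := hclosed i hi hmi
    rw [List.any_eq_false] at hcl
    have hx := hcl _ (List.mem_range.mpr hj)
    rw [he, ih hj] at hx
    simp at hx
theorem pvA_char (g : List (List Int)) (j : Nat) (hj : j < g.length) :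
    ((pvLoopA g (g.length + 1)
        ((List.range g.length).foldl
          (fun c i => if pvEdge g i 0 then c.set i true else c)
          (List.replicate g.length false))).getD j false = true) ↔ pvReach g j := by
  obtain ⟨h0len, h0get⟩ := pvInitA_go g (List.range g.length) (List.replicate g.length false)
    (fun x hx => by simpa using List.mem_range.mp hx)
  have h0len' : ((List.range g.length).foldl
      (fun c i => if pvEdge g i 0 then c.set i true else c)
      (List.replicate g.length false)).length = g.length := by rw [h0len]; simp
  have h0get' : ∀ k, ((List.range g.length).foldl
      (fun c i => if pvEdge g i 0 then c.set i true else c)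
      (List.replicate g.length false)).getD k false
      = (decide (k ∈ List.range g.length) && pvEdge g k 0) := by
    intro k; rw [h0get k]; simp
  have hsound0 : ∀ j', ((List.range g.length).foldl
      (fun c i => if pvEdge g i 0 then c.set i true else c)
      (List.replicate g.length false)).getD j' false = true → pvReach g j' := by
    intro j' h
    rw [h0get'] at h
    obtain ⟨_, he⟩ := Bool.and_eq_true_iff.mp h
    exact pvReach.base j' he
  obtain ⟨hm, hs, hcl⟩ := pvLoopA_spec g (g.length + 1) _ h0len' hsound0 (by omega)
  constructor
  · exact hs j
  · intro hr
    refine pvReach_marked g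
      (fun k => (pvLoopA g (g.length + 1)
        ((List.range g.length).foldl
          (fun c i => if pvEdge g i 0 then c.set i true else c)
          (List.replicate g.length false))).getD k false) ?_ ?_ j hr hj
    · intro i hi he
      apply hm
      rw [h0get']
      simp [List.mem_range.mpr hi, he]
    · intro i hi hif
      exact hcl i hi hif
theorem pvB_char (g : List (List Int)) (j : Nat) (hj : j < g.length) :
    (j ∈ pvLoopB g (g.length + 1)
        (PySem.Set.ofList ((List.range g.length).filter (fun i => pvEdge g i 0)))
        (PySem.Set.ofList ((List.range g.length).filter (fun i => pvEdge g i 0)))) ↔ pvReach g j := by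
  have hc0 : PySem.Set.ofList ((List.range g.length).filter (fun i => pvEdge g i 0))
      = (List.range g.length).filter (fun i => pvEdge g i 0) :=
    PySem.Set.ofList_eq_self_of_nodup _ (List.Nodup.filter _ List.nodup_range)
  rw [hc0]
  have hmem0 : ∀ x, x ∈ (List.range g.length).filter (fun i => pvEdge g i 0) ↔
      x < g.length ∧ pvEdge g x 0 = true := by
    intro x; rw [List.mem_filter, List.mem_range]
  obtain ⟨hs, hsub, hcl⟩ := pvLoopB_spec g (g.length + 1)
    ((List.range g.length).filter (fun i => pvEdge g i 0))
    ((List.range g.length).filter (fun i => pvEdge g i 0))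
    (fun j hjm => ⟨((hmem0 j).mp hjm).1, pvReach.base j ((hmem0 j).mp hjm).2⟩)
    (List.Nodup.filter _ List.nodup_range)
    (fun j hjm => hjm)
    (fun i _ _ j hjm hjf => absurd hjm hjf)
    (Or.inr (by omega))
  constructor
  · intro hmem; exact (hs j hmem).2
  · intro hr
    have := pvReach_marked g
      (fun k => decide (k ∈ pvLoopB g (g.length + 1)
        ((List.range g.length).filter (fun i => pvEdge g i 0))
        ((List.range g.length).filter (fun i => pvEdge g i 0)))) ?_ ?_ j hr hj
    · exact of_decide_eq_true this
    · intro i hi he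
      exact decide_eq_true (hsub i ((hmem0 i).mpr ⟨hi, he⟩))
    · intro i hi hif
      replace hif : i ∉ pvLoopB g (g.length + 1)
          ((List.range g.length).filter (fun i => pvEdge g i 0))
          ((List.range g.length).filter (fun i => pvEdge g i 0)) := by
        simpa using hif
      rw [List.any_eq_false]
      intro x hx
      by_cases hxr : x ∈ pvLoopB g (g.length + 1)
          ((List.range g.length).filter (fun i => pvEdge g i 0))
          ((List.range g.length).filter (fun i => pvEdge g i 0))
      · rw [hcl i hi hif x hxr]
        simp
      · simp [hxr]

-- ===== VERDICT (by name: the statement is the Claim_ definition above) =====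
theorem wantToReturnStart_spec : Claim_equal_wantToReturnStart := by
  intro g _ _
  unfold Spec_wantToReturnStart wantToReturnStart wantToReturnStart_alt
  refine PySem.List.any_congr_mem ?_
  intro j hj
  have hjn : j < g.length := List.mem_range.mp hj
  have hA := pvA_char g j hjn
  have hB := pvB_char g j hjn
  have : ((pvLoopA g (g.length + 1)
        ((List.range g.length).foldl
          (fun c i => if pvEdge g i 0 then c.set i true else c)
          (List.replicate g.length false))).getD j false)
      = PySem.Set.contains (pvLoopB g (g.length + 1)
        (PySem.Set.ofList ((List.range g.length).filter (fun i => pvEdge g i 0)))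
        (PySem.Set.ofList ((List.range g.length).filter (fun i => pvEdge g i 0)))) j := by
    rw [Bool.eq_iff_iff, hA, PySem.Set.contains_iff, hB]
  rw [this]
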